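-- pv_equiv track=rewrite | github.com/RangelGasharov/Python_Basics | algorithms/edabit_poker_hand_ranking.py | get_amount_of_triads
-- ===== SOURCE A (Python) =====
-- def get_amount_of_triads(cards_list):
--     rank_occurrence = {}
--     amount_of_triads = 0
--     for card in cards_list:
--         current_rank = card[0]
--         if current_rank in rank_occurrence:
--             rank_occurrence[current_rank] += 1
--         else:
--             rank_occurrence[current_rank] = 1
--     for key, value in rank_occurrence.items():
--         if rank_occurrence[key] == 3:
--             amount_of_triads += 1
--     return amount_of_triads
-- ===== SOURCE B (Python) =====
-- def get_amount_of_triads(cards_list):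
--     ranks = sorted(card[0] for card in cards_list)
--     if not ranks:
--         return 0
--     triads = 0
--     cur = ranks[0]
--     run = 1
--     for r in ranks[1:]:
--         if r == cur:
--             run += 1
--         else:
--             if run == 3:
--                 triads += 1
--             cur = r
--             run = 1
--     if run == 3:
--         triads += 1
--     return triads
-- ===== Notes on version B (the rewrite author's own statement) =====
-- stated objective: alternative
-- what changed: Replaces A's hash-map rank tally plus a second pass over the dict items by a sort of the rank characters followed by a single run-length scan that counts maximal runs of length exactly 3.
import Mathlib
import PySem

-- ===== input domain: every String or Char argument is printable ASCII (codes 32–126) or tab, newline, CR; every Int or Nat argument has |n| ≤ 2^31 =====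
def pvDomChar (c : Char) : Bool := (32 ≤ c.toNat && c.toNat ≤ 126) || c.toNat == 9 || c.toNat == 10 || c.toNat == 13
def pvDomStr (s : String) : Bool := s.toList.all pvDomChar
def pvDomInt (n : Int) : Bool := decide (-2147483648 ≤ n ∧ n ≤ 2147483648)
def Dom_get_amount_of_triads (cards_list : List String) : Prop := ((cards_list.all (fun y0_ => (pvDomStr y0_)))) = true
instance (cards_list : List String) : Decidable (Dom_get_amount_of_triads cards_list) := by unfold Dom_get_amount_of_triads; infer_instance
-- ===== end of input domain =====

-- B replaces A's dict tally + items pass by sort-then-run-length-scan (alternative algorithm, same return value).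


-- ===== PORT A =====
-- card[0]: exact on Pre_ (every card nonempty; Python raises IndexError on "" — outside Pre_)
def pvRank (card : String) : Char := (PySem.Str.pyGet? card 0).getD ' '

def get_amount_of_triads (cards_list : List String) : Int :=
  let rank_occurrence : PySem.Dict Char Int :=
    cards_list.foldl (fun d card =>
      let current_rank := pvRank card
      if d.contains current_rank then
        d.insert current_rank (d.getD current_rank 0 + 1)   -- rank_occurrence[current_rank] += 1
      else
        d.insert current_rank 1) PySem.Dict.empty
  rank_occurrence.items.foldl (fun acc kv =>
    if rank_occurrence.getD kv.1 0 == 3 then acc + 1 else acc) 0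

-- ===== PORT B =====
-- the 'for r in ranks[1:]' loop of Source B together with its trailing 'if run == 3' check
def pvRunScan : List Char → Char → Int → Int → Int
  | [], _, run, triads => if run == 3 then triads + 1 else triads
  | r :: rest, cur, run, triads =>
      if r == cur then pvRunScan rest cur (run + 1) triads
      else pvRunScan rest r 1 (if run == 3 then triads + 1 else triads)

def get_amount_of_triads_alt (cards_list : List String) : Int :=
  let ranks := PySem.List.sorted (cards_list.map pvRank) (fun x => x) false
  match ranks with
  | [] => 0
  | x :: rest => pvRunScan rest x 1 0

-- ===== PRECONDITION & SPEC =====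
-- Pre_ excludes lists containing an empty string: there card[0] raises IndexError in A (and in B).
def Pre_get_amount_of_triads (cards_list : List String) : Prop := ∀ c ∈ cards_list, c ≠ ""
instance (cards_list : List String) : Decidable (Pre_get_amount_of_triads cards_list) := by unfold Pre_get_amount_of_triads; infer_instance
def pvWitness_get_amount_of_triads : List String := ["AS", "AH", "AD", "7C", "7S"]

def Spec_get_amount_of_triads (cards_list : List String) (out : Int) : Prop := out = get_amount_of_triads_alt cards_list
instance (cards_list : List String) (out : Int) : Decidable (Spec_get_amount_of_triads cards_list out) := by unfold Spec_get_amount_of_triads; infer_instance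

-- ===== CLAIM (what is proved, stated in full; the proofs are below) =====
def Claim_equal_get_amount_of_triads : Prop := ∀ (cards_list : List String), Dom_get_amount_of_triads cards_list → Pre_get_amount_of_triads cards_list → Spec_get_amount_of_triads cards_list (get_amount_of_triads cards_list)

-- ===== LEMMAS AND PROOFS =====

-- common spec: number of distinct ranks occurring exactly 3 times, by structural recursion
def pvN : List Char → Int
  | [] => 0
  | x :: xs =>
      (if xs.count x + 1 = 3 then 1 else 0) +
      pvN (xs.filter (fun y => y ≠ x))
termination_by l => l.length
decreasing_by
  simpa using Nat.lt_succ_of_le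
    (le_trans (List.length_filter_le _ _) (by simp : xs.attach.length ≤ xs.length))

lemma pvN_eq_countP' : ∀ (n : Nat) (l : List Char), l.length = n →
    pvN l = ((PySem.Set.ofList l).countP (fun k => l.count k == 3) : Int) := by
  intro n
  induction n using Nat.strong_induction_on with
  | _ n ihn =>
    intro l hl
    match l with
    | [] => simp [pvN]
    | x :: xs =>
      have ih := ihn (xs.filter (fun y => y ≠ x)).length
        (by subst hl; exact Nat.lt_succ_of_le (List.length_filter_le _ _))
        (xs.filter (fun y => y ≠ x)) rfl
      rw [pvN, ih, PySem.Set.ofList_cons]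
      rw [List.countP_cons]
      have hperm : (PySem.Set.discard (PySem.Set.ofList xs) x).Perm
          (PySem.Set.ofList (xs.filter (fun y => y ≠ x))) := by
        rw [List.perm_ext_iff_of_nodup
          (PySem.Set.nodup_discard _ _ (PySem.Set.nodup_ofList _)) (PySem.Set.nodup_ofList _)]
        intro a
        simp [PySem.Set.mem_discard, PySem.Set.mem_ofList, List.mem_filter]
      rw [hperm.countP_eq]
      have hcong : List.countP (fun k => (x :: xs).count k == 3)
            (PySem.Set.ofList (xs.filter (fun y => y ≠ x)))
          = List.countP (fun k => (xs.filter (fun y => y ≠ x)).count k == 3)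
            (PySem.Set.ofList (xs.filter (fun y => y ≠ x))) := by
        apply List.countP_congr
        intro k hk
        have hkx : k ≠ x := by
          have hm := (PySem.Set.mem_ofList _ _).mp hk
          simpa using (List.mem_filter.mp hm).2
        simp [List.count_filter, hkx, Ne.symm hkx]
      rw [hcong]
      rw [List.count_cons_self]
      by_cases h3 : xs.count x + 1 = 3 <;>
        simp [h3] <;> omega

lemma pvN_eq_countP (l : List Char) :
    pvN l = ((PySem.Set.ofList l).countP (fun k => l.count k == 3) : Int) :=
  pvN_eq_countP' l.length l rfl

lemma A_eq (cards_list : List String) :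
    get_amount_of_triads cards_list =
      ((PySem.Set.ofList (cards_list.map pvRank)).countP
        (fun k => (cards_list.map pvRank).count k == 3) : Int) := by
  have h1 : (cards_list.foldl (fun d card =>
      let current_rank := pvRank card
      if d.contains current_rank then
        d.insert current_rank (d.getD current_rank 0 + 1)
      else
        d.insert current_rank (1 : Int)) PySem.Dict.empty)
    = PySem.Dict.counter (cards_list.map pvRank) := by
    rw [← PySem.Dict.foldl_insert_getD_add_one_eq_counter, List.foldl_map]
    apply PySem.List.foldl_congr_mem
    intro d card _
    by_cases hc : d.contains (pvRank card) = true
    · simp [hc]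
    · simp [hc, PySem.Dict.getD_of_not_contains (h := by simpa using hc)]
  unfold get_amount_of_triads
  rw [h1]
  show (PySem.Dict.counter (cards_list.map pvRank)).items.foldl
      (fun acc kv => if (PySem.Dict.counter (cards_list.map pvRank)).getD kv.1 0 == 3 then acc + 1 else acc) 0 = _
  rw [PySem.Dict.items_counter, List.foldl_map]
  simp only [PySem.Dict.getD_counter]
  rw [PySem.List.foldl_if_add_one]
  have hq : List.countP (fun k => (((cards_list.map pvRank).count k : Int) == 3))
      (PySem.Set.ofList (cards_list.map pvRank))
      = List.countP (fun k => ((cards_list.map pvRank).count k == 3))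
      (PySem.Set.ofList (cards_list.map pvRank)) := by
    apply List.countP_congr
    intro k _
    by_cases h : (cards_list.map pvRank).count k = 3
    · simp [h]
    · simp only [beq_iff_eq]
      constructor <;> intro hh <;> [exact absurd (by exact_mod_cast hh) h; exact absurd hh h]
  rw [hq]
  simp

lemma runScan_eq (s : List Char) : ∀ (cur : Char) (run triads : Int),
    s.Pairwise (· ≤ ·) → (∀ y ∈ s, cur ≤ y) →
    pvRunScan s cur run triads =
      triads + (if run + (s.count cur : Int) = 3 then 1 else 0) +
        pvN (s.filter (fun y => y ≠ cur)) := by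
  induction s with
  | nil =>
      intro cur run triads _ _
      simp only [pvRunScan, List.count_nil, List.filter_nil, pvN]
      by_cases h : run = 3 <;> simp [h]
  | cons x xs ih =>
      intro cur run triads hs hcur
      have hx : ∀ y ∈ xs, x ≤ y := fun y hy => (List.pairwise_cons.mp hs).1 y hy
      have hs' : xs.Pairwise (· ≤ ·) := (List.pairwise_cons.mp hs).2
      by_cases hxc : x = cur
      · subst hxc
        rw [pvRunScan]
        simp only [beq_self_eq_true, if_true]
        rw [ih x (run + 1) triads hs' hx]
        have : (x :: xs).count x = xs.count x + 1 := List.count_cons_self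
        rw [this]
        simp only [List.filter_cons]
        push_cast
        simp only [ne_eq, not_true_eq_false, decide_false, Bool.false_eq_true, if_false]
        congr 2
        omega
      · have hcx : cur ≤ x := hcur x List.mem_cons_self
        have hcur_notmem : cur ∉ xs := by
          intro hmem
          exact hxc (le_antisymm hcx (hx cur hmem)).symm
        rw [pvRunScan]
        have hbeq : (x == cur) = false := by simpa using hxc
        rw [hbeq]
        simp only [Bool.false_eq_true, if_false]
        rw [ih x 1 (if run == 3 then triads + 1 else triads) hs' hx]
        have hcount : (x :: xs).count cur = 0 := by
          simp [List.count_eq_zero.mpr hcur_notmem, hxc]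
        have hfilt : (x :: xs).filter (fun y => y ≠ cur) = x :: xs := by
          rw [List.filter_eq_self]
          intro a ha
          rcases List.mem_cons.mp ha with h | h
          · simpa [h] using hxc
          · simpa using (fun he : a = cur => hcur_notmem (he ▸ h))
        rw [hcount, hfilt, pvN]
        by_cases h3 : run = 3 <;> by_cases h4 : xs.count x + 1 = 3 <;>
          simp [h3, h4] <;> omega

lemma B_eq (cards_list : List String) :
    get_amount_of_triads_alt cards_list =
      pvN (PySem.List.sorted (cards_list.map pvRank) (fun x => x) false) := by
  have hmain : ∀ (s : List Char), s.Pairwise (· ≤ ·) →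
      (match s with | [] => (0:Int) | x :: rest => pvRunScan rest x 1 0) = pvN s := by
    intro s hp
    match s with
    | [] => simp [pvN]
    | x :: rest =>
      have h1 := List.pairwise_cons.mp hp
      show pvRunScan rest x 1 0 = pvN (x :: rest)
      rw [runScan_eq rest x 1 0 h1.2 h1.1, pvN]
      by_cases h3 : rest.count x + 1 = 3 <;> simp [h3] <;> omega
  exact hmain _ (by simpa using PySem.List.sorted_pairwise (cards_list.map pvRank) (fun x => x))

-- ===== VERDICT (by name: the statement is the Claim_ definition above) =====
theorem get_amount_of_triads_spec : Claim_equal_get_amount_of_triads := by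
  intro cards_list _ _
  unfold Spec_get_amount_of_triads
  rw [A_eq, B_eq, pvN_eq_countP]
  have hperm := PySem.List.sorted_perm (cards_list.map pvRank) (fun x => x) (rev := false)
  have hpred : (fun k => (PySem.List.sorted (cards_list.map pvRank) (fun x => x) false).count k == 3)
      = (fun k => (cards_list.map pvRank).count k == 3) :=
    funext (fun k => by rw [hperm.count_eq])
  rw [hpred]
  have hsetperm : (PySem.Set.ofList (cards_list.map pvRank)).Perm
      (PySem.Set.ofList (PySem.List.sorted (cards_list.map pvRank) (fun x => x) false)) := by
    rw [List.perm_ext_iff_of_nodup (PySem.Set.nodup_ofList _) (PySem.Set.nodup_ofList _)]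
    intro a
    simp only [PySem.Set.mem_ofList]
    exact (hperm.mem_iff).symm
  rw [hsetperm.countP_eq]
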